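-- pv_equiv track=rewrite | github.com/leocrapart/py-challenges | pages/poete.py | is_composed_word
-- ===== SOURCE A (Python) =====
-- def is_composed_word(word):
--     word_as_list = string2list(word)
--     word_length = len(word_as_list)
--     for i in range(word_length):
--         letter = word_as_list[i]
--         if letter == " " or letter == "-" or letter == "'" or letter == "." or letter == "!":
--             return True
--     return False
--
-- def string2list(string):
--     return list(string)
-- ===== SOURCE B (Python) =====
-- def is_composed_word(word):
--     return any(sep in word for sep in (" ", "-", "'", ".", "!"))
-- ===== Notes on version B (the rewrite author's own statement) =====
-- stated objective: simpler
-- what changed: Inverted the loop structure: instead of A's single index-based pass over list(word) testing each character against five separators, B iterates over the five fixed separators and does one whole-word substring membership search per separator, short-circuiting with any(); the per-word search runs in C instead of a per-character Python loop.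
import Mathlib
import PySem

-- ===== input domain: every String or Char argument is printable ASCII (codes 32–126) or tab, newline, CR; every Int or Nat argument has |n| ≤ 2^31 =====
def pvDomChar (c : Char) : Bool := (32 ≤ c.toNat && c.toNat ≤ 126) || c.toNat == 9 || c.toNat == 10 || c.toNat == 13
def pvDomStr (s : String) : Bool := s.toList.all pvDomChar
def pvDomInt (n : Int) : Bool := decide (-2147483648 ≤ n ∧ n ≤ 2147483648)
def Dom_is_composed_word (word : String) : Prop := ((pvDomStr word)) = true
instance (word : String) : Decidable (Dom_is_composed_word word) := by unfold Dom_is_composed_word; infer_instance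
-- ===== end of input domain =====

-- B inverts the loop: one substring search per fixed separator ('sep in word' over the five separators) instead of A's per-character scan with a 5-way branch (objective: simpler; a timing run measured B faster by a constant factor).

-- ===== PORT A =====
-- the for-loop over range(word_length) with an early 'return True'
def isCwLoop (lst : List Char) : List Int → Bool
  | [] => false
  | i :: rest =>
    match PySem.List.pyGet? lst i with
    | none => false  -- IndexError; unreachable for range indices
    | some letter =>
      if letter = ' ' || letter = '-' || letter = '\'' || letter = '.' || letter = '!' then
        true
      else
        isCwLoop lst rest

def string2list (s : String) : List Char := s.toList

def is_composed_word (word : String) : Bool :=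
  let word_as_list := string2list word
  let word_length := word_as_list.length
  isCwLoop word_as_list (PySem.List.pyRange 0 word_length 1)

-- ===== PORT B =====
-- any(sep in word for sep in (" ", "-", "'", ".", "!"))
def is_composed_word_alt (word : String) : Bool :=
  [" ", "-", "'", ".", "!"].any (fun sep => PySem.Str.isIn sep word)

-- ===== PRECONDITION & SPEC =====
def Spec_is_composed_word (word : String) (out : Bool) : Prop := out = is_composed_word_alt word
instance (word : String) (out : Bool) : Decidable (Spec_is_composed_word word out) := by unfold Spec_is_composed_word; infer_instance

-- ===== CLAIM =====
def Claim_equal_is_composed_word : Prop := ∀ (word : String), Dom_is_composed_word word → Spec_is_composed_word word (is_composed_word word)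

-- ===== LEMMAS AND PROOFS =====

def pvIsSep (c : Char) : Bool :=
  c = ' ' || c = '-' || c = '\'' || c = '.' || c = '!'

lemma isCwLoop_range (lst : List Char) (n : Nat) :
    isCwLoop lst (PySem.List.pyRange (n : Int) (lst.length : Int) 1) = (lst.drop n).any pvIsSep := by
  by_cases h : n < lst.length
  · have hr := PySem.List.pyRange_one_cons (a := (n : Int)) (b := (lst.length : Int)) (by exact_mod_cast h)
    rw [hr]
    have : ((n : Int) + 1) = ((n + 1 : Nat) : Int) := by push_cast; ring
    rw [this]
    have ih := isCwLoop_range lst (n + 1)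
    simp only [isCwLoop, PySem.List.pyGet?_natCast, List.getElem?_eq_getElem h]
    rw [ih]
    rw [List.drop_eq_getElem_cons h, List.any_cons]
    rcases Bool.eq_false_or_eq_true (pvIsSep lst[n]) with hb | hb
    · rw [hb, Bool.true_or]
      simp only [pvIsSep, Bool.or_eq_true, decide_eq_true_eq] at hb
      rcases hb with ⟨⟨⟨h' | h'⟩ | h'⟩ | h'⟩ | h' <;> simp [h']
    · rw [hb, Bool.false_or]
      simp only [pvIsSep, Bool.or_eq_false_iff, decide_eq_false_iff_not] at hb
      obtain ⟨⟨⟨⟨h1, h2⟩, h3⟩, h4⟩, h5⟩ := hb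
      simp [h1, h2, h3, h4, h5]
  · have hge : lst.length ≤ n := Nat.le_of_not_lt h
    have : PySem.List.pyRange (n : Int) (lst.length : Int) 1 = [] := by
      simp [PySem.List.pyRange]; omega
    rw [this, List.drop_eq_nil_of_le hge]
    rfl
termination_by lst.length - n
decreasing_by omega

-- a one-character needle is an infix iff it is a member
lemma singleton_infix_iff_mem (c : Char) (l : List Char) : [c] <:+: l ↔ c ∈ l := by
  constructor
  · rintro ⟨s, t, rfl⟩; simp
  · intro h
    obtain ⟨s, t, rfl⟩ := List.append_of_mem h
    exact ⟨s, t, by simp⟩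

lemma alt_eq_any (word : String) :
    is_composed_word_alt word = word.toList.any pvIsSep := by
  have e1 : (" " : String).toList = [' '] := rfl
  have e2 : ("-" : String).toList = ['-'] := rfl
  have e3 : ("'" : String).toList = ['\''] := rfl
  have e4 : ("." : String).toList = ['.'] := rfl
  have e5 : ("!" : String).toList = ['!'] := rfl
  unfold is_composed_word_alt
  rw [Bool.eq_iff_iff]
  simp only [List.any_cons, List.any_nil, Bool.or_false, Bool.or_eq_true,
    PySem.Str.isIn_iff_infix, e1, e2, e3, e4, e5, singleton_infix_iff_mem, List.any_eq_true]
  constructor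
  · rintro (hx | hx | hx | hx | hx) <;> exact ⟨_, hx, by decide⟩
  · rintro ⟨c, hc, hs⟩
    simp only [pvIsSep, Bool.or_eq_true, decide_eq_true_eq] at hs
    rcases hs with ⟨⟨⟨h' | h'⟩ | h'⟩ | h'⟩ | h' <;> subst h' <;> tauto

-- ===== VERDICT =====
theorem is_composed_word_spec : Claim_equal_is_composed_word := by
  intro word _
  unfold Spec_is_composed_word
  rw [alt_eq_any]
  unfold is_composed_word string2list
  have := isCwLoop_range word.toList 0
  simpa using this
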